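-- pv_equiv track=rewrite | github.com/YuvrajSingh-mist/SmolHub-Website | generate_model_files.py | categorize_model
-- ===== SOURCE A (Python) =====
-- def categorize_model(name, description, readme_content):
--     """Categorize the model based on its content"""
--     content = (name + " " + description + " " + readme_content).lower()
--
--     if any(term in content for term in ['gpt', 'llama', 'bert', 'transformer', 'language model', 'text', 'nlp']):
--         return "Language Models"
--     elif any(term in content for term in ['gan', 'dcgan', 'cyclegan', 'cgan', 'generative']):
--         return "Generative Models"
--     elif any(term in content for term in ['vision', 'clip', 'image', 'computer vision', 'cnn']):
--         return "Computer Vision"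
--     elif any(term in content for term in ['attention', 'differential']):
--         return "Attention Mechanisms"
--     elif any(term in content for term in ['audio', 'speech', 'clap', 'whisper']):
--         return "Audio/Speech"
--     elif any(term in content for term in ['training', 'ddp', 'distributed', 'optimization']):
--         return "Training Methods"
--     elif any(term in content for term in ['fine', 'tuning', 'peft', 'dpo']):
--         return "Fine-tuning"
--     else:
--         return "Other"
-- ===== SOURCE B (Python) =====
-- # keywords bucketed by their first character, each with its category priority
-- _INDEX = {
--     'g': [("gpt", 0), ("gan", 1), ("generative", 1)],
--     'l': [("llama", 0), ("language model", 0)],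
--     'b': [("bert", 0)],
--     't': [("transformer", 0), ("text", 0), ("training", 5), ("tuning", 6)],
--     'n': [("nlp", 0)],
--     'd': [("dcgan", 1), ("differential", 3), ("ddp", 5), ("distributed", 5), ("dpo", 6)],
--     'c': [("cyclegan", 1), ("cgan", 1), ("clip", 2), ("computer vision", 2), ("cnn", 2), ("clap", 4)],
--     'v': [("vision", 2)],
--     'i': [("image", 2)],
--     'a': [("attention", 3), ("audio", 4)],
--     's': [("speech", 4)],
--     'w': [("whisper", 4)],
--     'o': [("optimization", 5)],
--     'f': [("fine", 6)],
--     'p': [("peft", 6)],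
-- }
-- _LABELS = ["Language Models", "Generative Models", "Computer Vision",
--            "Attention Mechanisms", "Audio/Speech", "Training Methods",
--            "Fine-tuning", "Other"]
--
-- def categorize_model(name, description, readme_content):
--     content = (name + " " + description + " " + readme_content).lower()
--     # single left-to-right scan: at each position try only the keywords whose
--     # first character matches, keeping the best (lowest) category priority
--     best = 7
--     for i in range(len(content)):
--         for term, pri in _INDEX.get(content[i], []):
--             if pri < best and content.startswith(term, i):
--                 best = pri
--     return _LABELS[best]
-- ===== Notes on version B (the rewrite author's own statement) =====
-- stated objective: alternative
-- what changed: Replaced A's elif chain of seven category-driven 'term in content' substring tests by a single left-to-right scan over the content's positions that, at each position, tries only the keywords in a first-character bucket index (a dict from first char to (term, priority) lists, via startswith with offset), keeps the minimum priority seen, and indexes a label table.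
import Mathlib
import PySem

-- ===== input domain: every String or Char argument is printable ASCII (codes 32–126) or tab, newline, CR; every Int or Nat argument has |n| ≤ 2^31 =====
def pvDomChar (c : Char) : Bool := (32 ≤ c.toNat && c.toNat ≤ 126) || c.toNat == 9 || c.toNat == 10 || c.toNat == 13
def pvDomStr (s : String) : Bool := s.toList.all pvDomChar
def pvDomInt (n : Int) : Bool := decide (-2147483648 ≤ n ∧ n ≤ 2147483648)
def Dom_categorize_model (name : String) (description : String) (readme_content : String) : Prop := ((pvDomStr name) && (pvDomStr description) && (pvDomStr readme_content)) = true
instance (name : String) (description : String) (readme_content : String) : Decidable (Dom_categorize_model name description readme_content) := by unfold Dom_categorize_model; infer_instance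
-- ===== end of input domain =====

set_option maxRecDepth 8000

-- B replaces A's elif chain of `term in content` tests by a single left-to-right scan of the
-- content that, at each position, tries only the keywords in a first-character bucket index
-- and keeps the minimum category priority seen, then indexes a label table (objective: alternative).


-- ===== PORT A =====
def categorize_model (name : String) (description : String) (readme_content : String) : String :=
  let content := PySem.Str.lower (name ++ " " ++ description ++ " " ++ readme_content)
  if (["gpt", "llama", "bert", "transformer", "language model", "text", "nlp"].any fun t => PySem.Str.isIn t content) then
    "Language Models"
  else if (["gan", "dcgan", "cyclegan", "cgan", "generative"].any fun t => PySem.Str.isIn t content) then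
    "Generative Models"
  else if (["vision", "clip", "image", "computer vision", "cnn"].any fun t => PySem.Str.isIn t content) then
    "Computer Vision"
  else if (["attention", "differential"].any fun t => PySem.Str.isIn t content) then
    "Attention Mechanisms"
  else if (["audio", "speech", "clap", "whisper"].any fun t => PySem.Str.isIn t content) then
    "Audio/Speech"
  else if (["training", "ddp", "distributed", "optimization"].any fun t => PySem.Str.isIn t content) then
    "Training Methods"
  else if (["fine", "tuning", "peft", "dpo"].any fun t => PySem.Str.isIn t content) then
    "Fine-tuning"
  else
    "Other"

-- ===== PORT B =====
-- keywords bucketed by their first character, each with its category priority (_INDEX of Source B)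
def pvIndex : PySem.Dict Char (List (String × Nat)) := PySem.Dict.mk
  [ ('g', [("gpt", 0), ("gan", 1), ("generative", 1)])
  , ('l', [("llama", 0), ("language model", 0)])
  , ('b', [("bert", 0)])
  , ('t', [("transformer", 0), ("text", 0), ("training", 5), ("tuning", 6)])
  , ('n', [("nlp", 0)])
  , ('d', [("dcgan", 1), ("differential", 3), ("ddp", 5), ("distributed", 5), ("dpo", 6)])
  , ('c', [("cyclegan", 1), ("cgan", 1), ("clip", 2), ("computer vision", 2), ("cnn", 2), ("clap", 4)])
  , ('v', [("vision", 2)])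
  , ('i', [("image", 2)])
  , ('a', [("attention", 3), ("audio", 4)])
  , ('s', [("speech", 4)])
  , ('w', [("whisper", 4)])
  , ('o', [("optimization", 5)])
  , ('f', [("fine", 6)])
  , ('p', [("peft", 6)]) ]

def pvLabels : List String :=
  ["Language Models", "Generative Models", "Computer Vision",
   "Attention Mechanisms", "Audio/Speech", "Training Methods",
   "Fine-tuning", "Other"]

-- inner loop of Source B: `for term, pri in _INDEX.get(content[i], []): if pri < best and content.startswith(term, i): best = pri`
-- content[i] is PySem.List.pyGet? (in range for every scanned i, so the `none` arm is never taken);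
-- Python's content.startswith(term, i) with 0 ≤ i is exactly PySem.Chars.startswith on (toList.drop i).
def pvInner (c : List Char) (i : Int) (b : Nat) : Nat :=
  match PySem.List.pyGet? c i with
  | none => b
  | some ch =>
    (PySem.Dict.getD pvIndex ch []).foldl (fun b tp =>
      if tp.2 < b ∧ PySem.Chars.startswith (c.drop i.toNat) tp.1.toList then tp.2 else b) b

-- outer loop of Source B: `for i in range(len(content))`, as structural recursion over the positions
def pvOuter (c : List Char) (L : List Int) (b : Nat) : Nat :=
  match L with
  | [] => b
  | i :: L => pvOuter c L (pvInner c i b)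

def categorize_model_alt (name : String) (description : String) (readme_content : String) : String :=
  let content := PySem.Str.lower (name ++ " " ++ description ++ " " ++ readme_content)
  let c := content.toList
  let best := pvOuter c (PySem.List.pyRange 0 c.length 1) 7
  -- _LABELS[best]: best is always 0..7, in range; getD's default is never used
  pvLabels.getD best ""

-- ===== PRECONDITION & SPEC =====
def Spec_categorize_model (name : String) (description : String) (readme_content : String) (out : String) : Prop := out = categorize_model_alt name description readme_content
instance (name : String) (description : String) (readme_content : String) (out : String) : Decidable (Spec_categorize_model name description readme_content out) := by unfold Spec_categorize_model; infer_instance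

-- ===== CLAIM =====
def Claim_equal_categorize_model : Prop := ∀ (name : String) (description : String) (readme_content : String), Dom_categorize_model name description readme_content → Spec_categorize_model name description readme_content (categorize_model name description readme_content)

-- ===== LEMMAS AND PROOFS =====

-- proof-side flat table: all keywords with their category priority
def pvTerms : List (String × Nat) :=
  [ ("gpt", 0), ("llama", 0), ("bert", 0), ("transformer", 0), ("language model", 0), ("text", 0), ("nlp", 0)
  , ("gan", 1), ("dcgan", 1), ("cyclegan", 1), ("cgan", 1), ("generative", 1)
  , ("vision", 2), ("clip", 2), ("image", 2), ("computer vision", 2), ("cnn", 2)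
  , ("attention", 3), ("differential", 3)
  , ("audio", 4), ("speech", 4), ("clap", 4), ("whisper", 4)
  , ("training", 5), ("ddp", 5), ("distributed", 5), ("optimization", 5)
  , ("fine", 6), ("tuning", 6), ("peft", 6), ("dpo", 6) ]

-- the category word lists of A, as a function of the priority index (proof-side only)
def pvGroup : Nat → List String
  | 0 => ["gpt", "llama", "bert", "transformer", "language model", "text", "nlp"]
  | 1 => ["gan", "dcgan", "cyclegan", "cgan", "generative"]
  | 2 => ["vision", "clip", "image", "computer vision", "cnn"]
  | 3 => ["attention", "differential"]
  | 4 => ["audio", "speech", "clap", "whisper"]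
  | 5 => ["training", "ddp", "distributed", "optimization"]
  | 6 => ["fine", "tuning", "peft", "dpo"]
  | _ => []

lemma pvFlat_char : ∀ tp ∈ pvTerms, tp.2 < 7 ∧ tp.1 ∈ pvGroup tp.2 ∧ tp.1.toList ≠ [] := by decide

lemma pvGroup_flat : ∀ k < 7, ∀ t ∈ pvGroup k, (t, k) ∈ pvTerms := by decide

-- every keyword sits in the bucket of its own first character
lemma pvTerms_bucket : ∀ tp ∈ pvTerms,
    tp.1.toList.head? = some (tp.1.toList.headD 'x') ∧
    tp ∈ PySem.Dict.getD pvIndex (tp.1.toList.headD 'x') [] := by decide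

-- every bucket entry is a keyword of the flat table
lemma pvIndex_items_sub : ∀ e ∈ pvIndex.items, ∀ tp ∈ e.2, tp ∈ pvTerms := by decide

lemma pvBucket_sub (ch : Char) : ∀ tp ∈ PySem.Dict.getD pvIndex ch [], tp ∈ pvTerms := by
  intro tp htp
  rw [PySem.Dict.getD_eq_get?_getD] at htp
  cases hg : PySem.Dict.get? pvIndex ch with
  | none => rw [hg] at htp; simp at htp
  | some l =>
    rw [hg] at htp
    exact pvIndex_items_sub (ch, l) (PySem.Dict.mem_items_of_get?_eq_some _ hg) tp (by simpa using htp)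

lemma pvFold_le (c : List Char) (i : Int) (T : List (String × Nat)) (b : Nat) :
    T.foldl (fun b tp => if tp.2 < b ∧ PySem.Chars.startswith (c.drop i.toNat) tp.1.toList then tp.2 else b) b ≤ b := by
  induction T generalizing b with
  | nil => simp
  | cons tp T ih =>
    simp only [List.foldl_cons]
    split
    · rename_i h; exact le_trans (ih _) (le_of_lt h.1)
    · exact ih b

lemma pvFold_le_of (c : List Char) (i : Int) (T : List (String × Nat)) (b : Nat)
    {t : String} {p : Nat} (hm : (t, p) ∈ T)
    (hs : PySem.Chars.startswith (c.drop i.toNat) t.toList = true) :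
    T.foldl (fun b tp => if tp.2 < b ∧ PySem.Chars.startswith (c.drop i.toNat) tp.1.toList then tp.2 else b) b ≤ p := by
  induction T generalizing b with
  | nil => simp at hm
  | cons tp T ih =>
    simp only [List.mem_cons] at hm
    simp only [List.foldl_cons]
    rcases hm with heq | h
    · rw [← heq]
      by_cases hb : p < b
      · rw [if_pos (by exact ⟨hb, by simp [hs]⟩)]
        exact pvFold_le c i T p
      · rw [if_neg (by intro hcon; exact hb hcon.1)]
        exact le_trans (pvFold_le c i T b) (by omega)
    · split
      · exact ih _ h
      · exact ih _ h

lemma pvFold_cases (c : List Char) (i : Int) (T : List (String × Nat)) (b : Nat) :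
    T.foldl (fun b tp => if tp.2 < b ∧ PySem.Chars.startswith (c.drop i.toNat) tp.1.toList then tp.2 else b) b = b ∨
      ∃ tp ∈ T, PySem.Chars.startswith (c.drop i.toNat) tp.1.toList = true ∧
        T.foldl (fun b tp => if tp.2 < b ∧ PySem.Chars.startswith (c.drop i.toNat) tp.1.toList then tp.2 else b) b = tp.2 := by
  induction T generalizing b with
  | nil => simp
  | cons tp T ih =>
    simp only [List.foldl_cons]
    split
    · rename_i hc
      rcases ih tp.2 with h | ⟨tq, hq, hsq, hEq⟩
      · exact Or.inr ⟨tp, List.mem_cons_self .., by simpa using hc.2, h⟩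
      · exact Or.inr ⟨tq, List.mem_cons_of_mem _ hq, hsq, hEq⟩
    · rcases ih b with h | ⟨tq, hq, hsq, hEq⟩
      · exact Or.inl h
      · exact Or.inr ⟨tq, List.mem_cons_of_mem _ hq, hsq, hEq⟩

lemma pvInner_le (c : List Char) (i : Int) (b : Nat) : pvInner c i b ≤ b := by
  unfold pvInner
  match PySem.List.pyGet? c i with
  | none => exact le_refl b
  | some ch => exact pvFold_le c i _ b

lemma pvInner_le_of (c : List Char) (i : Int) (b : Nat) {t : String} {p : Nat}
    (h0 : 0 ≤ i)
    (hm : (t, p) ∈ pvTerms) (hs : PySem.Chars.startswith (c.drop i.toNat) t.toList = true) :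
    pvInner c i b ≤ p := by
  obtain ⟨hhead, hbucket⟩ := pvTerms_bucket (t, p) hm
  have hpre : t.toList <+: c.drop i.toNat := (PySem.Chars.startswith_iff _ _).mp hs
  have hch : (c.drop i.toNat).head? = some (t.toList.headD 'x') := by
    rcases hpre with ⟨r, hr⟩
    rw [← hr]
    cases htl : t.toList with
    | nil => rw [htl] at hhead; simp at hhead
    | cons a l =>
      rw [htl] at hhead
      simp at hhead
      simp
  have hget : PySem.List.pyGet? c i = some (t.toList.headD 'x') := by
    rw [show i = ((i.toNat : Nat) : Int) by omega, PySem.List.pyGet?_natCast,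
        ← List.head?_drop]
    simpa using hch
  unfold pvInner
  rw [hget]
  exact pvFold_le_of c i _ b hbucket hs

lemma pvInner_cases (c : List Char) (i : Int) (b : Nat) :
    pvInner c i b = b ∨ ∃ tp ∈ pvTerms,
      PySem.Chars.startswith (c.drop i.toNat) tp.1.toList = true ∧ pvInner c i b = tp.2 := by
  unfold pvInner
  cases hget : PySem.List.pyGet? c i with
  | none => exact Or.inl rfl
  | some ch =>
    rcases pvFold_cases c i (PySem.Dict.getD pvIndex ch []) b with h | ⟨tp, hm, hsp, hEq⟩
    · exact Or.inl h
    · exact Or.inr ⟨tp, pvBucket_sub ch tp hm, hsp, hEq⟩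

lemma pvOuter_le (c : List Char) (L : List Int) (b : Nat) : pvOuter c L b ≤ b := by
  induction L generalizing b with
  | nil => exact le_refl b
  | cons i L ih =>
    rw [show pvOuter c (i :: L) b = pvOuter c L (pvInner c i b) from rfl]
    exact le_trans (ih _) (pvInner_le c i b)

lemma pvOuter_le_of (c : List Char) (L : List Int) (b : Nat) {i : Int} {t : String} {p : Nat}
    (hi : i ∈ L) (h0 : 0 ≤ i) (hm : (t, p) ∈ pvTerms)
    (hs : PySem.Chars.startswith (c.drop i.toNat) t.toList = true) :
    pvOuter c L b ≤ p := by
  induction L generalizing b with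
  | nil => simp at hi
  | cons j L ih =>
    simp only [List.mem_cons] at hi
    rw [show pvOuter c (j :: L) b = pvOuter c L (pvInner c j b) from rfl]
    rcases hi with heq | h
    · subst heq
      exact le_trans (pvOuter_le c L _) (pvInner_le_of c i b h0 hm hs)
    · exact ih _ h

lemma pvOuter_cases (c : List Char) (L : List Int) (b : Nat) :
    pvOuter c L b = b ∨ ∃ i ∈ L, ∃ tp ∈ pvTerms,
      PySem.Chars.startswith (c.drop i.toNat) tp.1.toList = true ∧ pvOuter c L b = tp.2 := by
  induction L generalizing b with
  | nil => simp [pvOuter]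
  | cons j L ih =>
    rw [show pvOuter c (j :: L) b = pvOuter c L (pvInner c j b) from rfl]
    rcases pvInner_cases c j b with h | ⟨tp, hm, hsp, hEq⟩
    · rw [h]
      rcases ih b with h' | ⟨i, hi, tq, hq, hsq, hEq'⟩
      · exact Or.inl h'
      · exact Or.inr ⟨i, List.mem_cons_of_mem _ hi, tq, hq, hsq, hEq'⟩
    · rcases ih (pvInner c j b) with h' | ⟨i, hi, tq, hq, hsq, hEq'⟩
      · rw [h', hEq]
        exact Or.inr ⟨j, List.mem_cons_self .., tp, hm, hsp, rfl⟩
      · exact Or.inr ⟨i, List.mem_cons_of_mem _ hi, tq, hq, hsq, hEq'⟩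

-- `term in content` ↔ some scanned position starts with the term (for a nonempty term)
lemma pvIsIn_iff (t : String) (s : String) (hne : t.toList ≠ []) :
    PySem.Str.isIn t s = true ↔
      ∃ i ∈ PySem.List.pyRange 0 s.toList.length 1,
        PySem.Chars.startswith (s.toList.drop i.toNat) t.toList = true := by
  constructor
  · intro h
    have h' : PySem.Chars.isIn t.toList s.toList = true := by
      rw [PySem.Chars.isIn_iff_infix]
      exact (PySem.Str.isIn_iff_infix _ _).mp h
    obtain ⟨j, hj⟩ := (PySem.Chars.exists_prefix_drop_iff_isIn t.toList s.toList).mpr h'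
    have hjlt : j < s.toList.length := by
      by_contra hge
      rw [List.drop_eq_nil_of_le (by omega)] at hj
      exact hne (List.prefix_nil.mp hj)
    refine ⟨(j : Int), ?_, ?_⟩
    · rw [PySem.List.mem_pyRange_one]
      exact ⟨Int.natCast_nonneg j, by exact_mod_cast hjlt⟩
    · rw [PySem.Chars.startswith_iff]; simpa using hj
  · rintro ⟨i, _, hsw⟩
    rw [PySem.Str.isIn_iff_infix]
    have hp := (PySem.Chars.startswith_iff _ _).mp hsw
    exact hp.isInfix.trans (List.drop_suffix _ _).isInfix

-- B's scan result is the index of the first matching category (7 when none matches)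
lemma pvBest_eq (s : String) (k : Nat) (hk : k ≤ 7)
    (hmatch : k < 7 → ((pvGroup k).any fun t => PySem.Str.isIn t s) = true)
    (hearlier : ∀ q < k, ((pvGroup q).any fun t => PySem.Str.isIn t s) = false) :
    pvOuter s.toList (PySem.List.pyRange 0 s.toList.length 1) 7 = k := by
  have hge : k ≤ pvOuter s.toList (PySem.List.pyRange 0 s.toList.length 1) 7 := by
    rcases pvOuter_cases s.toList (PySem.List.pyRange 0 s.toList.length 1) 7 with h | ⟨i, hi, tp, hm, hsp, hEq⟩
    · omega
    · rw [hEq]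
      obtain ⟨hlt, hgrp, hne⟩ := pvFlat_char tp hm
      by_contra hlt2
      have hq := hearlier tp.2 (by omega)
      have hin : PySem.Str.isIn tp.1 s = true := (pvIsIn_iff tp.1 s hne).mpr ⟨i, hi, hsp⟩
      have : ((pvGroup tp.2).any fun t => PySem.Str.isIn t s) = true :=
        List.any_eq_true.mpr ⟨tp.1, hgrp, hin⟩
      rw [hq] at this; exact Bool.noConfusion this
  rcases Nat.lt_or_ge k 7 with hk7 | hk7
  · obtain ⟨t, ht, hin⟩ := List.any_eq_true.mp (hmatch hk7)
    have hmem : (t, k) ∈ pvTerms := pvGroup_flat k hk7 t ht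
    have hne : t.toList ≠ [] := (pvFlat_char (t, k) hmem).2.2
    obtain ⟨i, hi, hsw⟩ := (pvIsIn_iff t s hne).mp hin
    obtain ⟨hi0, -⟩ := (PySem.List.mem_pyRange_one).mp hi
    have := pvOuter_le_of s.toList (PySem.List.pyRange 0 s.toList.length 1) 7 hi hi0 hmem hsw
    omega
  · have := pvOuter_le s.toList (PySem.List.pyRange 0 s.toList.length 1) 7
    omega

-- ===== VERDICT =====
theorem categorize_model_spec : Claim_equal_categorize_model := by
  intro name description readme_content _
  unfold Spec_categorize_model categorize_model categorize_model_alt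
  dsimp only
  set s := PySem.Str.lower (name ++ " " ++ description ++ " " ++ readme_content) with hsdef
  split_ifs with h0 h1 h2 h3 h4 h5 h6
  · rw [pvBest_eq s 0 (by omega) (fun _ => by simpa [pvGroup] using h0) (by omega)]
    rfl
  · rw [pvBest_eq s 1 (by omega) (fun _ => by simpa [pvGroup] using h1)
        (by intro q hq; interval_cases q; simpa [pvGroup, Bool.not_eq_true] using h0)]
    rfl
  · rw [pvBest_eq s 2 (by omega) (fun _ => by simpa [pvGroup] using h2)
        (by intro q hq; interval_cases q
            · simpa [pvGroup, Bool.not_eq_true] using h0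
            · simpa [pvGroup, Bool.not_eq_true] using h1)]
    rfl
  · rw [pvBest_eq s 3 (by omega) (fun _ => by simpa [pvGroup] using h3)
        (by intro q hq; interval_cases q
            · simpa [pvGroup, Bool.not_eq_true] using h0
            · simpa [pvGroup, Bool.not_eq_true] using h1
            · simpa [pvGroup, Bool.not_eq_true] using h2)]
    rfl
  · rw [pvBest_eq s 4 (by omega) (fun _ => by simpa [pvGroup] using h4)
        (by intro q hq; interval_cases q
            · simpa [pvGroup, Bool.not_eq_true] using h0
            · simpa [pvGroup, Bool.not_eq_true] using h1
            · simpa [pvGroup, Bool.not_eq_true] using h2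
            · simpa [pvGroup, Bool.not_eq_true] using h3)]
    rfl
  · rw [pvBest_eq s 5 (by omega) (fun _ => by simpa [pvGroup] using h5)
        (by intro q hq; interval_cases q
            · simpa [pvGroup, Bool.not_eq_true] using h0
            · simpa [pvGroup, Bool.not_eq_true] using h1
            · simpa [pvGroup, Bool.not_eq_true] using h2
            · simpa [pvGroup, Bool.not_eq_true] using h3
            · simpa [pvGroup, Bool.not_eq_true] using h4)]
    rfl
  · rw [pvBest_eq s 6 (by omega) (fun _ => by simpa [pvGroup] using h6)
        (by intro q hq; interval_cases q
            · simpa [pvGroup, Bool.not_eq_true] using h0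
            · simpa [pvGroup, Bool.not_eq_true] using h1
            · simpa [pvGroup, Bool.not_eq_true] using h2
            · simpa [pvGroup, Bool.not_eq_true] using h3
            · simpa [pvGroup, Bool.not_eq_true] using h4
            · simpa [pvGroup, Bool.not_eq_true] using h5)]
    rfl
  · rw [pvBest_eq s 7 (by omega) (by omega)
        (by intro q hq; interval_cases q
            · simpa [pvGroup, Bool.not_eq_true] using h0
            · simpa [pvGroup, Bool.not_eq_true] using h1
            · simpa [pvGroup, Bool.not_eq_true] using h2
            · simpa [pvGroup, Bool.not_eq_true] using h3
            · simpa [pvGroup, Bool.not_eq_true] using h4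
            · simpa [pvGroup, Bool.not_eq_true] using h5
            · simpa [pvGroup, Bool.not_eq_true] using h6)]
    rfl
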